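-- pv_equiv track=rewrite | github.com/secretlounge/secretlounge-ng | secretlounge_ng/globals.py | fnv32a
-- ===== SOURCE A (Python) =====
-- def fnv32a(int_parts, byte_parts) -> int:
-- 	h = 0x811c9dc5
-- 	p = 0x01000193
-- 	for i in int_parts:
-- 		i = abs(i)
-- 		# trivial little endian encoding
-- 		while i != 0:
-- 			h = ((h ^ (i & 0xff)) * p) & 0xffffffff
-- 			i >>= 8
-- 	for bs in byte_parts:
-- 		for b in bs:
-- 			h = ((h ^ b) * p) & 0xffffffff
-- 	return h
-- ===== SOURCE B (Python) =====
-- def fnv32a(int_parts, byte_parts) -> int: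
--     # Build one flat byte buffer first (minimal little-endian encoding of each
--     # abs(int), then all raw bytes), then do a single FNV-1a fold over it.
--     buf = []
--     for i in int_parts:
--         a = abs(i)
--         buf.extend(a.to_bytes((a.bit_length() + 7) // 8, 'little'))
--     for bs in byte_parts:
--         buf.extend(bs)
--     h = 0x811c9dc5
--     for b in buf:
--         h = ((h ^ b) * 0x01000193) & 0xffffffff
--     return h
-- ===== Notes on version B (the rewrite author's own statement) =====
-- stated objective: alternative
-- what changed: B separates encoding from hashing: it first materialises one flat byte buffer (minimal little-endian bytes of each abs(int) via int.to_bytes, then the raw byte lists) and then folds FNV-1a once over that buffer, replacing A's interleaved while-loop/nested-loop hashing.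
import Mathlib
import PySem

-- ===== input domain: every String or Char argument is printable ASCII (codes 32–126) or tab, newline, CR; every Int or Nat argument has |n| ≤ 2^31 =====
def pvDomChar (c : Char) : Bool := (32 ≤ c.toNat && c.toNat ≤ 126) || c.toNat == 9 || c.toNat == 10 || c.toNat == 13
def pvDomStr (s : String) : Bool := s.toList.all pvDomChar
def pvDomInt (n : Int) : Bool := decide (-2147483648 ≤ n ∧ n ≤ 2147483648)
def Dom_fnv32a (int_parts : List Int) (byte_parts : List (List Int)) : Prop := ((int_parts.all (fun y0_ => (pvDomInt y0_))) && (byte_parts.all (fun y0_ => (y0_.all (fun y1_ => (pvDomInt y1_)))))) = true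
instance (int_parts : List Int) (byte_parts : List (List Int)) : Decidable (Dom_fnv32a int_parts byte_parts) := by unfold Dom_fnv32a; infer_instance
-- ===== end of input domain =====

-- B builds one flat byte buffer (minimal little-endian encoding of each abs(int),
-- then the raw byte lists) and folds FNV-1a once over it; alternative decomposition, same cost.

-- ===== PORT A =====
-- h = ((h ^ b) * p) & 0xffffffff   (p = 0x01000193); PySem bxor/band are Python-exact on negatives
def fnvStepA (h b : Int) : Int := PySem.Int.band ((PySem.Int.bxor h b) * 16777619) 4294967295

-- the 'while i != 0' loop; i = abs(original) is nonnegative, represented exactly by the Nat i.natAbs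
def fnvIntLoopA (h : Int) (n : Nat) : Int :=
  if n = 0 then h
  else fnvIntLoopA (fnvStepA h ((n &&& 255 : Nat) : Int)) (n >>> 8)
termination_by n
decreasing_by simp [Nat.shiftRight_eq_div_pow]; omega

def fnv32a (int_parts : List Int) (byte_parts : List (List Int)) : Int :=
  let h := int_parts.foldl (fun h i => fnvIntLoopA h i.natAbs) 2166136261
  byte_parts.foldl (fun h bs => bs.foldl fnvStepA h) h

-- ===== PORT B =====
-- a.to_bytes((a.bit_length()+7)//8, 'little'): minimal little-endian bytes of a nonnegative int — exact
def leBytes (n : Nat) : List Int :=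
  if n = 0 then []
  else ((n &&& 255 : Nat) : Int) :: leBytes (n >>> 8)
termination_by n
decreasing_by simp [Nat.shiftRight_eq_div_pow]; omega

def fnvStepB (h b : Int) : Int := PySem.Int.band ((PySem.Int.bxor h b) * 16777619) 4294967295

def fnv32a_alt (int_parts : List Int) (byte_parts : List (List Int)) : Int :=
  let buf := int_parts.foldl (fun acc i => acc ++ leBytes i.natAbs) []
  let buf := byte_parts.foldl (fun acc bs => acc ++ bs) buf
  buf.foldl fnvStepB 2166136261

-- ===== PRECONDITION & SPEC =====
def Spec_fnv32a (int_parts : List Int) (byte_parts : List (List Int)) (out : Int) : Prop := out = fnv32a_alt int_parts byte_parts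
instance (int_parts : List Int) (byte_parts : List (List Int)) (out : Int) : Decidable (Spec_fnv32a int_parts byte_parts out) := by unfold Spec_fnv32a; infer_instance

-- ===== CLAIM (what is proved, stated in full; the proofs are below) =====
def Claim_equal_fnv32a : Prop := ∀ (int_parts : List Int) (byte_parts : List (List Int)), Dom_fnv32a int_parts byte_parts → Spec_fnv32a int_parts byte_parts (fnv32a int_parts byte_parts)

-- ===== LEMMAS AND PROOFS =====

-- the accumulating buffer build is append of flatMaps
theorem foldl_append_flatMap {α : Type} (g : α → List Int) :
    ∀ (l : List α) (acc : List Int),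
      l.foldl (fun acc x => acc ++ g x) acc = acc ++ l.flatMap g := by
  intro l
  induction l with
  | nil => simp
  | cons x t ih => intro acc; simp [ih, List.append_assoc]

-- folding over a flatMap is the nested fold
theorem foldl_flatMap {α : Type} (f : Int → Int → Int) (g : α → List Int) :
    ∀ (l : List α) (h : Int),
      (l.flatMap g).foldl f h = l.foldl (fun h x => (g x).foldl f h) h := by
  intro l
  induction l with
  | nil => simp
  | cons x t ih => intro h; simp [List.foldl_append, ih]

-- the while loop hashes exactly the minimal little-endian bytes
theorem fnvIntLoopA_eq_leBytes : ∀ (n : Nat) (h : Int),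
    fnvIntLoopA h n = (leBytes n).foldl fnvStepA h := by
  intro n
  induction n using Nat.strong_induction_on with
  | _ n ih =>
    intro h
    by_cases hn : n = 0
    · simp [fnvIntLoopA, leBytes, hn]
    · rw [fnvIntLoopA, leBytes]
      simp only [hn, if_false, List.foldl_cons]
      exact ih (n >>> 8) (by simp [Nat.shiftRight_eq_div_pow]; omega) _

-- ===== VERDICT (by name: the statement is the Claim_ definition above) =====
theorem fnv32a_spec : Claim_equal_fnv32a := by
  intro ip bp _
  show fnv32a ip bp = fnv32a_alt ip bp
  have halt : fnv32a_alt ip bp =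
      (bp.foldl (fun acc bs => acc ++ bs)
        (ip.foldl (fun acc i => acc ++ leBytes i.natAbs) [])).foldl fnvStepB 2166136261 := rfl
  rw [foldl_append_flatMap (fun i => leBytes i.natAbs) ip [],
      foldl_append_flatMap (fun bs => bs) bp, List.nil_append,
      List.foldl_append, foldl_flatMap, foldl_flatMap] at halt
  rw [halt]
  show bp.foldl (fun h bs => bs.foldl fnvStepA h)
        (ip.foldl (fun h i => fnvIntLoopA h i.natAbs) 2166136261) = _
  have hstep : fnvStepB = fnvStepA := rfl
  simp only [hstep]
  congr 1
  congr 1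
  funext h i
  exact fnvIntLoopA_eq_leBytes i.natAbs h
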